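-- pv_equiv track=rewrite | github.com/babu-mathew-666/flag_creator | to_flag_format.py | convert
-- ===== SOURCE A (Python) =====
-- def convert(flag):
--     result = ''
--     for i in flag:
--         if i == 'o' or i == 'O':
--             result += '0'
--         elif i == 's' or i == 'S':
--             result += '5'
--         elif i == 'g' or i == 'G':
--             result += '6'
--         elif i == ' ':
--             result += '_'
--         elif i == 'e' or i == 'E':
--             result += '3'
--         else:
--             result += i
--     return result
-- ===== SOURCE B (Python) =====
-- _SUBS = (('o', '0'), ('O', '0'), ('s', '5'), ('S', '5'),
--          ('g', '6'), ('G', '6'), (' ', '_'), ('e', '3'), ('E', '3'))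
--
-- def convert(flag):
--     # staged global replaces: one full replace pass per leet pair; correct because
--     # no replacement character ('0','5','6','_','3') is itself a source character
--     for src, dst in _SUBS:
--         flag = flag.replace(src, dst)
--     return flag
-- ===== Notes on version B (the rewrite author's own statement) =====
-- stated objective: idiomatic
-- what changed: Replaces A's single character-by-character Python pass with an if-elif ladder by nine staged whole-string str.replace passes, one per leet pair; correct since no replacement character is itself a source character.
import Mathlib
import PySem

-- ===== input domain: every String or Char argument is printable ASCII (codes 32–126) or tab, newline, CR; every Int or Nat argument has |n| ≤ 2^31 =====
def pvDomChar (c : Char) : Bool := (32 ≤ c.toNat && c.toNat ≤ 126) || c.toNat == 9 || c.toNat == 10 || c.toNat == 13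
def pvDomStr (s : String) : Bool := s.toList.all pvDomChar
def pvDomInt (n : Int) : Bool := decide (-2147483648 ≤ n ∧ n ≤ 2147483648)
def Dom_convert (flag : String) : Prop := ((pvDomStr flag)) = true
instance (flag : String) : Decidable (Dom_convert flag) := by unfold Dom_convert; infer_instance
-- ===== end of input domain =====

-- B replaces A's single accumulator pass with an if-elif ladder by nine staged whole-string
-- str.replace passes (one per leet pair); same result since no replacement char is a source char.

-- ===== PORT A =====
-- A: accumulate result += <branch of the if-elif ladder> over each character of flag.
def convertStep (i : Char) : String :=
  if i = 'o' ∨ i = 'O' then "0"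
  else if i = 's' ∨ i = 'S' then "5"
  else if i = 'g' ∨ i = 'G' then "6"
  else if i = ' ' then "_"
  else if i = 'e' ∨ i = 'E' then "3"
  else String.ofList [i]

def convert (flag : String) : String :=
  flag.toList.foldl (fun result i => result ++ convertStep i) ""

-- ===== PORT B =====
-- the fixed pair list _SUBS from Source B
def convertPairs : List (String × String) :=
  [("o","0"), ("O","0"), ("s","5"), ("S","5"), ("g","6"), ("G","6"), (" ","_"), ("e","3"), ("E","3")]

-- for src, dst in _SUBS: flag = flag.replace(src, dst)
def convert_alt (flag : String) : String :=
  convertPairs.foldl (fun f p => PySem.Str.replace f p.1 p.2) flag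

-- ===== PRECONDITION & SPEC =====
def Spec_convert (flag : String) (out : String) : Prop := out = convert_alt flag
instance (flag : String) (out : String) : Decidable (Spec_convert flag out) := by unfold Spec_convert; infer_instance

-- ===== CLAIM (what is proved, stated in full; the proofs are below) =====
def Claim_equal_convert : Prop := ∀ (flag : String), Dom_convert flag → Spec_convert flag (convert flag)

-- ===== LEMMAS AND PROOFS =====

-- the per-character substitution both programs realise
def leet (c : Char) : Char :=
  if c = 'o' ∨ c = 'O' then '0'
  else if c = 's' ∨ c = 'S' then '5'
  else if c = 'g' ∨ c = 'G' then '6'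
  else if c = ' ' then '_'
  else if c = 'e' ∨ c = 'E' then '3'
  else c

-- single-char substitution for one replace pass
def sub1 (a b c : Char) : Char := if c = a then b else c

theorem go1 (a b : Char) : ∀ (fuel : Nat) (l acc : List Char), l.length ≤ fuel →
    PySem.Chars.replace.go [a] [b] fuel l acc = acc.reverse ++ l.map (sub1 a b) := by
  intro fuel
  induction fuel with
  | zero => intro l acc h; simp at h; subst h; simp [PySem.Chars.replace.go]
  | succ n ih =>
      intro l acc h
      cases l with
      | nil => simp [PySem.Chars.replace.go]
      | cons c t =>
          simp only [PySem.Chars.replace.go]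
          by_cases hc : c = a
          · subst hc
            have hp : List.isPrefixOf [c] (c :: t) = true := by simp [List.isPrefixOf]
            rw [if_pos hp]
            simp only [List.length_singleton, List.drop_one, List.tail_cons]
            rw [ih t ([b].reverse ++ acc) (by simpa using Nat.le_of_succ_le_succ h)]
            simp [sub1]
          · have hp : List.isPrefixOf [a] (c :: t) = false := by
              simp [List.isPrefixOf]; exact fun h' => absurd h'.symm hc
            rw [if_neg (by simp [hp])]
            rw [ih t (c :: acc) (by simpa using Nat.le_of_succ_le_succ h)]
            simp [sub1, hc]

theorem rep1 (s : List Char) (a b : Char) :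
    PySem.Chars.replace s [a] [b] = s.map (sub1 a b) := by
  simp only [PySem.Chars.replace]
  rw [if_neg (by simp), go1 a b s.length s [] (le_refl _)]
  simp

-- the nine staged single-char substitutions compose to leet
theorem subs_comp (c : Char) :
    sub1 'E' '3' (sub1 'e' '3' (sub1 ' ' '_' (sub1 'G' '6' (sub1 'g' '6'
      (sub1 'S' '5' (sub1 's' '5' (sub1 'O' '0' (sub1 'o' '0' c)))))))) = leet c := by
  by_cases h : c = 'o' ∨ c = 'O' ∨ c = 's' ∨ c = 'S' ∨ c = 'g' ∨ c = 'G' ∨ c = ' ' ∨ c = 'e' ∨ c = 'E'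
  · rcases h with h|h|h|h|h|h|h|h|h <;> subst h <;> decide
  · push Not at h
    obtain ⟨h1,h2,h3,h4,h5,h6,h7,h8,h9⟩ := h
    simp [sub1, leet, h1,h2,h3,h4,h5,h6,h7,h8,h9]

theorem rstep (s sa sb : String) (a b : Char) (h1 : sa.toList = [a]) (h2 : sb.toList = [b]) :
    (PySem.Str.replace s sa sb).toList = s.toList.map (sub1 a b) := by
  rw [PySem.Str.toList_replace, h1, h2, rep1]

theorem convert_alt_chars (flag : String) :
    (convert_alt flag).toList = flag.toList.map leet := by
  simp only [convert_alt, convertPairs, List.foldl_cons, List.foldl_nil]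
  rw [rstep _ _ _ 'E' '3' rfl rfl, rstep _ _ _ 'e' '3' rfl rfl, rstep _ _ _ ' ' '_' rfl rfl,
    rstep _ _ _ 'G' '6' rfl rfl, rstep _ _ _ 'g' '6' rfl rfl, rstep _ _ _ 'S' '5' rfl rfl,
    rstep _ _ _ 's' '5' rfl rfl, rstep _ _ _ 'O' '0' rfl rfl, rstep _ _ _ 'o' '0' rfl rfl]
  simp only [List.map_map]
  exact List.map_congr_left (fun c _ => by simpa [Function.comp] using subs_comp c)

theorem convertStep_eq (c : Char) : convertStep c = String.ofList [leet c] := by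
  by_cases h : c = 'o' ∨ c = 'O' ∨ c = 's' ∨ c = 'S' ∨ c = 'g' ∨ c = 'G' ∨ c = ' ' ∨ c = 'e' ∨ c = 'E'
  · rcases h with h|h|h|h|h|h|h|h|h <;> subst h <;> decide
  · push Not at h
    obtain ⟨h1,h2,h3,h4,h5,h6,h7,h8,h9⟩ := h
    simp [convertStep, leet, h1,h2,h3,h4,h5,h6,h7,h8,h9]

theorem convert_foldl (l : List Char) (acc : String) :
    l.foldl (fun result i => result ++ convertStep i) acc = acc ++ String.ofList (l.map leet) := by
  induction l generalizing acc with
  | nil => simp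
  | cons c l ih =>
      rw [List.foldl_cons, ih, convertStep_eq, List.map_cons,
        show String.ofList (leet c :: l.map leet)
            = String.ofList [leet c] ++ String.ofList (l.map leet)
          from by rw [← String.ofList_append]; simp,
        ← String.append_assoc]

-- ===== VERDICT (by name: the statement is the Claim_ definition above) =====
theorem convert_spec : Claim_equal_convert := by
  intro flag _
  show convert flag = convert_alt flag
  have hb := convert_alt_chars flag
  have ha : convert flag = String.ofList (flag.toList.map leet) := by
    simp [convert, convert_foldl]
  rw [ha, ← hb, String.ofList_toList]
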